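-- pv_equiv track=rewrite | github.com/sfw/loom | src/loom/tools/tooling_common/version_matrix.py | parse_semver_tuple
-- ===== SOURCE A (Python) =====
-- def parse_semver_tuple(version_text: str) -> tuple[int, int, int] | None:
--     """Best-effort parse of MAJOR.MINOR.PATCH tuple from version output."""
--     text = str(version_text or "")
--     digits: list[str] = []
--     current = ""
--     for ch in text:
--         if ch.isdigit():
--             current += ch
--             continue
--         if current:
--             digits.append(current)
--             current = ""
--         if len(digits) >= 3:
--             break
--     if current and len(digits) < 3:
--         digits.append(current)
--     if not digits:
--         return None
--     while len(digits) < 3: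
--         digits.append("0")
--     try:
--         return (int(digits[0]), int(digits[1]), int(digits[2]))
--     except ValueError:
--         return None
-- ===== SOURCE B (Python) =====
-- import re
--
-- def parse_semver_tuple(version_text: str) -> tuple[int, int, int] | None:
--     """Best-effort parse of MAJOR.MINOR.PATCH tuple from version output."""
--     groups = re.findall(r"\d+", str(version_text or ""))
--     if not groups:
--         return None
--     groups += ["0"] * (3 - len(groups))
--     return (int(groups[0]), int(groups[1]), int(groups[2]))
-- ===== Notes on version B (the rewrite author's own statement) =====
-- stated objective: idiomatic
-- what changed: Replaced the manual current/break character state machine with a single regex findall of digit runs, zero-padded to three entries.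
import Mathlib
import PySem

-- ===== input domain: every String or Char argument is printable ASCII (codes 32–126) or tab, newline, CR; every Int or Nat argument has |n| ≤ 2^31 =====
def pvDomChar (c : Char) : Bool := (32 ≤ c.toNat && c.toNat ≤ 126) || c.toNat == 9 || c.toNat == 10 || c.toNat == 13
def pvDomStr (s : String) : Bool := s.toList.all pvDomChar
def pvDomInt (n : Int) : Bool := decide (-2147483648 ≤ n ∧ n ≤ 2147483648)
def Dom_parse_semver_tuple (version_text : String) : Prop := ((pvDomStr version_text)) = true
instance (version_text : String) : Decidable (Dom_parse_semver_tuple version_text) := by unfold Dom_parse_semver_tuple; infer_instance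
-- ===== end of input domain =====

-- B replaces A's manual current/break char state machine by a one-step split into digit runs
-- (regex findall) padded with "0"; same return value, objective: idiomatic.

-- ===== PORT A =====
-- Python strings are carried as List Char (exact on the ASCII domain); int(...) is PySem.Int.ofChars?.
-- The for-loop with its `current` accumulator and `break`: returns (digits, current) at loop exit.
def pvLoopA : List Char → List (List Char) → List Char → (List (List Char) × List Char)
  | [], ds, cur => (ds, cur)
  | c :: rest, ds, cur =>
    if PySem.Chars.isdigit c then
      pvLoopA rest ds (cur ++ [c])            -- current += ch; continue
    else
      let ds' := if cur ≠ [] then ds ++ [cur] else ds   -- flush current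
      if 3 ≤ ds'.length then (ds', [])        -- break (current is "" here)
      else pvLoopA rest ds' []

-- while len(digits) < 3: digits.append("0")
def pvPadA (ds : List (List Char)) : List (List Char) :=
  if ds.length < 3 then pvPadA (ds ++ [['0']]) else ds
  termination_by 3 - ds.length
  decreasing_by simp_all; omega

-- try: return (int(d0), int(d1), int(d2)) except ValueError: return None
def pvTripleA (ds : List (List Char)) : Option (Int × Int × Int) :=
  match PySem.Int.ofChars? (ds.getD 0 []), PySem.Int.ofChars? (ds.getD 1 []),
        PySem.Int.ofChars? (ds.getD 2 []) with
  | some x, some y, some z => some (x, y, z)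
  | _, _, _ => none

def parse_semver_tuple (version_text : String) : Option (Int × Int × Int) :=
  -- text = str(version_text or "") is version_text itself for a str argument
  let p := pvLoopA version_text.toList [] []
  let ds := if p.2 ≠ [] ∧ p.1.length < 3 then p.1 ++ [p.2] else p.1  -- final flush
  if ds = [] then none
  else pvTripleA (pvPadA ds)

-- ===== PORT B =====
-- re.findall(r"\d+", text): the maximal digit runs, in order (exact on the ASCII domain).
def pvRuns : List Char → List (List Char)
  | [] => []
  | c :: rest =>
    if PySem.Chars.isdigit c then
      (c :: rest.takeWhile PySem.Chars.isdigit) :: pvRuns (rest.dropWhile PySem.Chars.isdigit)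
    else pvRuns rest
  termination_by cs => cs.length
  decreasing_by
  · simpa using Nat.lt_succ_of_le (List.length_dropWhile_le _ _)
  · simp

-- (int(g0), int(g1), int(g2)); int() is total on digit runs, the none branch is a totalization guard
def pvTripleB (gs : List (List Char)) : Option (Int × Int × Int) := do
  let x ← PySem.Int.ofChars? (gs.getD 0 [])
  let y ← PySem.Int.ofChars? (gs.getD 1 [])
  let z ← PySem.Int.ofChars? (gs.getD 2 [])
  pure (x, y, z)

def parse_semver_tuple_alt (version_text : String) : Option (Int × Int × Int) :=
  let gs := pvRuns version_text.toList
  if gs = [] then none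
  else pvTripleB (gs ++ List.replicate (3 - gs.length) ['0'])

-- ===== PRECONDITION & SPEC =====
def Spec_parse_semver_tuple (version_text : String) (out : Option (Int × Int × Int)) : Prop := out = parse_semver_tuple_alt version_text
instance (version_text : String) (out : Option (Int × Int × Int)) : Decidable (Spec_parse_semver_tuple version_text out) := by unfold Spec_parse_semver_tuple; infer_instance

-- ===== CLAIM (what is proved, stated in full; the proofs are below) =====
def Claim_equal_parse_semver_tuple : Prop := ∀ (version_text : String), Dom_parse_semver_tuple version_text → Spec_parse_semver_tuple version_text (parse_semver_tuple version_text)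

-- ===== LEMMAS AND PROOFS =====

theorem takeWhile_all_append {p : Char → Bool} {t : List Char} {c : Char} (cs : List Char)
    (h : ∀ x ∈ t, p x = true) (hc : p c = false) :
    (t ++ c :: cs).takeWhile p = t := by
  induction t with
  | nil => simp [hc]
  | cons d t ih =>
    simp only [List.cons_append, List.takeWhile_cons, h d (by simp)]
    simp [ih (fun x hx => h x (by simp [hx]))]

theorem dropWhile_all_append {p : Char → Bool} {t : List Char} {c : Char} (cs : List Char)
    (h : ∀ x ∈ t, p x = true) (hc : p c = false) :
    (t ++ c :: cs).dropWhile p = c :: cs := by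
  induction t with
  | nil => simp [hc]
  | cons d t ih =>
    simp only [List.cons_append, List.dropWhile_cons, h d (by simp)]
    simp [ih (fun x hx => h x (by simp [hx]))]

theorem runs_nondigit {c : Char} (cs : List Char) (hc : PySem.Chars.isdigit c = false) :
    pvRuns (c :: cs) = pvRuns cs := by
  rw [pvRuns]; simp [hc]

theorem runs_allDigits {cur : List Char} {c : Char} (cs : List Char)
    (h : ∀ x ∈ cur, PySem.Chars.isdigit x = true) (hne : cur ≠ [])
    (hc : PySem.Chars.isdigit c = false) :
    pvRuns (cur ++ c :: cs) = cur :: pvRuns cs := by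
  cases cur with
  | nil => exact absurd rfl hne
  | cons d t =>
    rw [List.cons_append, pvRuns]
    have ht : ∀ x ∈ t, PySem.Chars.isdigit x = true := fun x hx => h x (by simp [hx])
    simp [h d (by simp), takeWhile_all_append cs ht hc, dropWhile_all_append cs ht hc,
      runs_nondigit cs hc]

theorem runs_allDigits_self {cur : List Char}
    (h : ∀ x ∈ cur, PySem.Chars.isdigit x = true) (hne : cur ≠ []) :
    pvRuns cur = [cur] := by
  cases cur with
  | nil => exact absurd rfl hne
  | cons d t =>
    rw [pvRuns]
    have ht : ∀ x ∈ t, PySem.Chars.isdigit x = true := fun x hx => h x (by simp [hx])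
    have hdw : List.dropWhile PySem.Chars.isdigit t = [] :=
      List.dropWhile_eq_nil_iff.mpr (fun x hx => by simp [ht x hx])
    simp [h d (by simp), List.takeWhile_eq_self_iff.mpr ht, hdw, pvRuns]

/-- The loop + final flush of A computes the first three digit runs. -/
theorem loopA_runs : ∀ (cs : List Char) (ds : List (List Char)) (cur : List Char),
    ds.length < 3 → (∀ x ∈ cur, PySem.Chars.isdigit x = true) →
    (let p := pvLoopA cs ds cur
     if p.2 ≠ [] ∧ p.1.length < 3 then p.1 ++ [p.2] else p.1)
      = (ds ++ pvRuns (cur ++ cs)).take 3 := by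
  intro cs
  induction cs with
  | nil =>
    intro ds cur hlen hcur
    simp only [pvLoopA, List.append_nil]
    by_cases hne : cur = []
    · subst hne; simp [pvRuns, List.take_of_length_le (le_of_lt hlen)]
    · rw [runs_allDigits_self hcur hne]
      have : (ds ++ [cur]).length ≤ 3 := by simp; omega
      simp [hne, hlen, List.take_of_length_le this]
  | cons c rest ih =>
    intro ds cur hlen hcur
    rw [pvLoopA]
    by_cases hd : PySem.Chars.isdigit c = true
    · simp only [hd, if_true]
      have := ih ds (cur ++ [c]) hlen
        (fun x hx => by rcases List.mem_append.1 hx with h | h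
                        · exact hcur x h
                        · simp at h; subst h; exact hd)
      rw [this, List.append_assoc]
      simp
    · have hdf : PySem.Chars.isdigit c = false := by simpa using hd
      simp only [hdf, Bool.false_eq_true, if_false]
      have hruns : pvRuns (cur ++ c :: rest)
          = (if cur ≠ [] then ds ++ [cur] else ds).drop ds.length ++ pvRuns rest := by
        by_cases hne : cur = []
        · subst hne; simp [runs_nondigit rest hdf]
        · rw [runs_allDigits rest hcur hne hdf]; simp [hne]
      set ds' := if cur ≠ [] then ds ++ [cur] else ds with hds'
      have hpre : ds ++ pvRuns (cur ++ c :: rest) = ds' ++ pvRuns rest := by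
        rw [hruns, ← List.append_assoc]
        congr 1
        by_cases hne : cur = [] <;> simp [hds', hne]
      have hlen' : ds'.length ≤ 3 := by
        by_cases hne : cur = [] <;> simp [hds', hne] <;> omega
      by_cases hge : 3 ≤ ds'.length
      · have h3 : ds'.length = 3 := le_antisymm hlen' hge
        simp only [hge, if_true]
        rw [hpre, List.take_left' h3]; simp
      · simp only [hge, if_false]
        have h := ih ds' [] (by omega) (by simp)
        simp only [List.nil_append] at h
        rw [hpre]
        exact h

theorem triple_match_bind (l : List (List Char)) : pvTripleA l = pvTripleB l := by
  unfold pvTripleA pvTripleB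
  cases PySem.Int.ofChars? (l.getD 0 []) <;>
    cases PySem.Int.ofChars? (l.getD 1 []) <;>
    cases PySem.Int.ofChars? (l.getD 2 []) <;> rfl

/-- padding the first three runs vs padding the whole run list: same first three entries. -/
theorem final_eq (g : List (List Char)) :
    (if g.take 3 = [] then none else pvTripleA (pvPadA (g.take 3)))
      = (if g = [] then none else pvTripleB (g ++ List.replicate (3 - g.length) ['0'])) := by
  match g with
  | [] => simp
  | [a] =>
    rw [triple_match_bind]
    have : pvPadA [a] = [a, ['0'], ['0']] := by
      rw [pvPadA]; simp; rw [pvPadA]; simp; rw [pvPadA]; simp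
    simp [this]
  | [a, b] =>
    rw [triple_match_bind]
    have : pvPadA [a, b] = [a, b, ['0']] := by
      rw [pvPadA]; simp; rw [pvPadA]; simp
    simp [this]
  | a :: b :: c :: rest =>
    rw [triple_match_bind]
    have hp : pvPadA [a, b, c] = [a, b, c] := by rw [pvPadA]; simp
    have hr : 3 - (a :: b :: c :: rest).length = 0 := by simp
    simp only [List.take, hp, hr, List.replicate, List.append_nil]
    simp [pvTripleB]

-- ===== VERDICT (by name: the statement is the Claim_ definition above) =====
theorem parse_semver_tuple_spec : Claim_equal_parse_semver_tuple := by
  intro s _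
  unfold Spec_parse_semver_tuple parse_semver_tuple parse_semver_tuple_alt
  have h := loopA_runs s.toList [] [] (by simp) (by simp)
  simp only [List.nil_append] at h
  simp only [h]
  exact final_eq (pvRuns s.toList)
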